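-- pv_equiv track=rewrite | github.com/michaelhcarruthers/AbletonMPCX | tools/theory.py | _nearest_in_key
-- ===== SOURCE A (Python) =====
-- SCALE_INTERVALS = {
--     "major":      [0, 2, 4, 5, 7, 9, 11],
--     "minor":      [0, 2, 3, 5, 7, 8, 10],
--     "dorian":     [0, 2, 3, 5, 7, 9, 10],
--     "phrygian":   [0, 1, 3, 5, 7, 8, 10],
--     "lydian":     [0, 2, 4, 6, 7, 9, 11],
--     "mixolydian": [0, 2, 4, 5, 7, 9, 10],
--     "locrian":    [0, 1, 3, 5, 6, 8, 10],
--     "harmonic_minor": [0, 2, 3, 5, 7, 8, 11],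
-- }
--
-- def _pitch_class(midi_note: int) -> int:
--     return midi_note % 12
--
-- def _scale_pitch_classes(root: int, mode: str) -> set[int]:
--     intervals = SCALE_INTERVALS.get(mode, SCALE_INTERVALS["major"])
--     return {(root + i) % 12 for i in intervals}
--
-- def _nearest_in_key(midi_note: int, root: int, mode: str) -> int:
--     """Return the nearest in-key MIDI note to the given note."""
--     scale = _scale_pitch_classes(root, mode)
--     pc = _pitch_class(midi_note)
--     if pc in scale:
--         return midi_note
--     # Try up and down
--     for delta in range(1, 7):
--         if (pc + delta) % 12 in scale:
--             return midi_note + delta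
--         if (pc - delta) % 12 in scale:
--             return midi_note - delta
--     return midi_note
-- ===== SOURCE B (Python) =====
-- SCALE_INTERVALS = {
--     "major":      [0, 2, 4, 5, 7, 9, 11],
--     "minor":      [0, 2, 3, 5, 7, 8, 10],
--     "dorian":     [0, 2, 3, 5, 7, 9, 10],
--     "phrygian":   [0, 1, 3, 5, 7, 8, 10],
--     "lydian":     [0, 2, 4, 6, 7, 9, 11],
--     "mixolydian": [0, 2, 4, 5, 7, 9, 10],
--     "locrian":    [0, 1, 3, 5, 6, 8, 10],
--     "harmonic_minor": [0, 2, 3, 5, 7, 8, 11],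
-- }
--
-- def _nearest_in_key(midi_note: int, root: int, mode: str) -> int:
--     """Return the nearest in-key MIDI note, scanning the scale degrees directly."""
--     intervals = SCALE_INTERVALS.get(mode, SCALE_INTERVALS["major"])
--     pc = midi_note % 12
--     best = None
--     for i in intervals:
--         d_up = (root + i - pc) % 12
--         delta = d_up if d_up <= 6 else d_up - 12
--         key = (abs(delta), delta < 0)
--         if best is None or key < best[0]:
--             best = (key, delta)
--     return midi_note + best[1]
-- ===== Notes on version B (the rewrite author's own statement) =====
-- stated objective: alternative
-- what changed: Replaced A's radial delta-by-delta probe (try +1,-1,+2,-2,... until a scale pitch class is hit) with a single pass over the scale degrees that computes each degree's signed nearest offset and keeps the one minimizing (abs, downward), matching A's upward tie-break.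
import Mathlib
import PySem

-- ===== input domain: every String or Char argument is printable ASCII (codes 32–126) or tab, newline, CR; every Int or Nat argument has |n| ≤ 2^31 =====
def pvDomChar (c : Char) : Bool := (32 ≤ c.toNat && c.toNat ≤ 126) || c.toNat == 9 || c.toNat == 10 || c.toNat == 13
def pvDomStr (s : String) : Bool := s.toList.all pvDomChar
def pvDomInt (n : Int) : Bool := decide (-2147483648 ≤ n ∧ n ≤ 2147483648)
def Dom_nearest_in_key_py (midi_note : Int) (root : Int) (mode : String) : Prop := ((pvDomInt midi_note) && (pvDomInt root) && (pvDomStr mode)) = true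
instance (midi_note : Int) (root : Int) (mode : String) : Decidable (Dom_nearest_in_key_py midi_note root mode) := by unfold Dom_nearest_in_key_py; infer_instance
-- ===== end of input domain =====

-- B replaces A's radial ±delta probe with a direct minimisation over the scale's
-- pitch classes (signed nearest offset per degree, tie-break preferring upward);
-- objective: alternative (same cost, different algorithm).

-- ===== PORT A =====
def pvScaleIntervals : PySem.Dict String (List Int) :=
  PySem.Dict.ofList
    [("major",      [0, 2, 4, 5, 7, 9, 11]),
     ("minor",      [0, 2, 3, 5, 7, 8, 10]),
     ("dorian",     [0, 2, 3, 5, 7, 9, 10]),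
     ("phrygian",   [0, 1, 3, 5, 7, 8, 10]),
     ("lydian",     [0, 2, 4, 6, 7, 9, 11]),
     ("mixolydian", [0, 2, 4, 5, 7, 9, 10]),
     ("locrian",    [0, 1, 3, 5, 6, 8, 10]),
     ("harmonic_minor", [0, 2, 3, 5, 7, 8, 11])]

def pvPitchClass (midi_note : Int) : Int := PySem.Int.mod midi_note 12

def pvScalePitchClasses (root : Int) (mode : String) : PySem.Set Int :=
  let intervals := (pvScaleIntervals.get? mode).getD [0, 2, 4, 5, 7, 9, 11]
  PySem.Set.ofList (intervals.map (fun i => PySem.Int.mod (root + i) 12))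

-- the 'for delta in range(1, 7)' loop with its two early returns
def pvALoop (scale : PySem.Set Int) (pc midi : Int) : List Int → Int
  | [] => midi
  | d :: rest =>
    if PySem.Set.contains scale (PySem.Int.mod (pc + d) 12) then midi + d
    else if PySem.Set.contains scale (PySem.Int.mod (pc - d) 12) then midi - d
    else pvALoop scale pc midi rest

def nearest_in_key_py (midi_note : Int) (root : Int) (mode : String) : Int :=
  let scale := pvScalePitchClasses root mode
  let pc := pvPitchClass midi_note
  if PySem.Set.contains scale pc then midi_note
  else pvALoop scale pc midi_note (PySem.List.pyRange 1 7 1)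

-- ===== PORT B =====
def pvScaleIntervalsB : PySem.Dict String (List Int) :=
  PySem.Dict.ofList
    [("major",      [0, 2, 4, 5, 7, 9, 11]),
     ("minor",      [0, 2, 3, 5, 7, 8, 10]),
     ("dorian",     [0, 2, 3, 5, 7, 9, 10]),
     ("phrygian",   [0, 1, 3, 5, 7, 8, 10]),
     ("lydian",     [0, 2, 4, 6, 7, 9, 11]),
     ("mixolydian", [0, 2, 4, 5, 7, 9, 10]),
     ("locrian",    [0, 1, 3, 5, 6, 8, 10]),
     ("harmonic_minor", [0, 2, 3, 5, 7, 8, 11])]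

-- Python tuple '<' on ((abs, neg?)) keys
def pvKeyLt (k1 k2 : Int × Bool) : Bool :=
  k1.1 < k2.1 || (k1.1 == k2.1 && (!k1.2 && k2.2))

def pvBStep (root pc : Int) (best : Option ((Int × Bool) × Int)) (i : Int) :
    Option ((Int × Bool) × Int) :=
  let d_up := PySem.Int.mod (root + i - pc) 12
  let delta := if d_up ≤ 6 then d_up else d_up - 12
  let key := (|delta|, decide (delta < 0))
  match best with
  | none => some (key, delta)
  | some b => if pvKeyLt key b.1 then some (key, delta) else best

def nearest_in_key_py_alt (midi_note : Int) (root : Int) (mode : String) : Int :=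
  let intervals := (pvScaleIntervalsB.get? mode).getD [0, 2, 4, 5, 7, 9, 11]
  let pc := PySem.Int.mod midi_note 12
  let best := intervals.foldl (pvBStep root pc) none
  -- intervals is always one of the non-empty scale lists, so best is some; .getD totalises
  midi_note + ((best.map (·.2)).getD 0)

-- ===== PRECONDITION & SPEC =====
def Spec_nearest_in_key_py (midi_note : Int) (root : Int) (mode : String) (out : Int) : Prop := out = nearest_in_key_py_alt midi_note root mode
instance (midi_note : Int) (root : Int) (mode : String) (out : Int) : Decidable (Spec_nearest_in_key_py midi_note root mode out) := by unfold Spec_nearest_in_key_py; infer_instance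

-- ===== CLAIM (what is proved, stated in full; the proofs are below) =====
def Claim_equal_nearest_in_key_py : Prop := ∀ (midi_note : Int) (root : Int) (mode : String), Dom_nearest_in_key_py midi_note root mode → Spec_nearest_in_key_py midi_note root mode (nearest_in_key_py midi_note root mode)

-- ===== LEMMAS AND PROOFS =====

-- the eight interval lists
def pvLists : List (List Int) :=
  [[0, 2, 4, 5, 7, 9, 11], [0, 2, 3, 5, 7, 8, 10], [0, 2, 3, 5, 7, 9, 10],
   [0, 1, 3, 5, 7, 8, 10], [0, 2, 4, 6, 7, 9, 11], [0, 2, 4, 5, 7, 9, 10],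
   [0, 1, 3, 5, 6, 8, 10], [0, 2, 3, 5, 7, 8, 11]]

def pvIvs (mode : String) : List Int :=
  (pvScaleIntervals.get? mode).getD [0, 2, 4, 5, 7, 9, 11]

-- midi-free delta of A's loop
def pvALoopD (scale : PySem.Set Int) (pc : Int) : List Int → Int
  | [] => 0
  | d :: rest =>
    if PySem.Set.contains scale (PySem.Int.mod (pc + d) 12) then d
    else if PySem.Set.contains scale (PySem.Int.mod (pc - d) 12) then -d
    else pvALoopD scale pc rest

def pvDA (L : List Int) (r pc : Int) : Int :=
  let scale := PySem.Set.ofList (L.map (fun i => PySem.Int.mod (r + i) 12))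
  if PySem.Set.contains scale pc then 0 else pvALoopD scale pc (PySem.List.pyRange 1 7 1)

def pvDB (L : List Int) (r pc : Int) : Int :=
  (((L.foldl (pvBStep r pc) none)).map (·.2)).getD 0

theorem pvMod12 (x : Int) : PySem.Int.mod x 12 = x % 12 :=
  PySem.Int.mod_eq_emod_of_pos (by norm_num)

theorem pvALoop_shift (scale : PySem.Set Int) (pc midi : Int) (L : List Int) :
    pvALoop scale pc midi L = midi + pvALoopD scale pc L := by
  induction L with
  | nil => simp [pvALoop, pvALoopD]
  | cons d rest ih =>
    simp only [pvALoop, pvALoopD]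
    split_ifs with h1 h2
    · rfl
    · omega
    · exact ih

theorem pvA_eq (m r : Int) (mo : String) :
    nearest_in_key_py m r mo = m + pvDA (pvIvs mo) r (PySem.Int.mod m 12) := by
  unfold nearest_in_key_py pvScalePitchClasses pvPitchClass pvDA pvIvs
  simp only []
  split_ifs with h <;> simp_all [pvALoop_shift]

theorem pvB_eq (m r : Int) (mo : String) :
    nearest_in_key_py_alt m r mo = m + pvDB (pvIvs mo) r (PySem.Int.mod m 12) := rfl

theorem pvDA_root (L : List Int) (r pc : Int) :
    pvDA L r pc = pvDA L (r % 12) pc := by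
  unfold pvDA
  have : (L.map (fun i => PySem.Int.mod (r + i) 12)) =
      (L.map (fun i => PySem.Int.mod (r % 12 + i) 12)) := by
    apply List.map_congr_left
    intro i _
    simp only [pvMod12]
    omega
  rw [this]

theorem pvBStep_root (r pc : Int) : pvBStep r pc = pvBStep (r % 12) pc := by
  funext best i
  unfold pvBStep
  have : PySem.Int.mod (r + i - pc) 12 = PySem.Int.mod (r % 12 + i - pc) 12 := by
    simp only [pvMod12]; omega
  rw [this]

theorem pvDB_root (L : List Int) (r pc : Int) :
    pvDB L r pc = pvDB L (r % 12) pc := by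
  unfold pvDB
  rw [pvBStep_root]

theorem pvIvs_mem (mo : String) : pvIvs mo ∈ pvLists := by
  unfold pvIvs pvLists
  have hd : pvScaleIntervals = PySem.Dict.mk
    [("major",      [0, 2, 4, 5, 7, 9, 11]),
     ("minor",      [0, 2, 3, 5, 7, 8, 10]),
     ("dorian",     [0, 2, 3, 5, 7, 9, 10]),
     ("phrygian",   [0, 1, 3, 5, 7, 8, 10]),
     ("lydian",     [0, 2, 4, 6, 7, 9, 11]),
     ("mixolydian", [0, 2, 4, 5, 7, 9, 10]),
     ("locrian",    [0, 1, 3, 5, 6, 8, 10]),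
     ("harmonic_minor", [0, 2, 3, 5, 7, 8, 11])] := by decide
  rw [hd]
  simp only [PySem.Dict.get?_mk_cons]
  split_ifs <;> simp [PySem.Dict.get?]

theorem pvFinAll (L : List Int)
    (h : ∀ rn pn : Fin 12, pvDA L (rn : Int) (pn : Int) = pvDB L (rn : Int) (pn : Int))
    (r pc : Int) (hr1 : 0 ≤ r) (hr2 : r < 12) (hp1 : 0 ≤ pc) (hp2 : pc < 12) :
    pvDA L r pc = pvDB L r pc := by
  have := h ⟨r.toNat, by omega⟩ ⟨pc.toNat, by omega⟩
  simpa [Int.toNat_of_nonneg hr1, Int.toNat_of_nonneg hp1] using this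

theorem pvMain (L : List Int) (hL : L ∈ pvLists) (r pc : Int)
    (hr1 : 0 ≤ r) (hr2 : r < 12) (hp1 : 0 ≤ pc) (hp2 : pc < 12) :
    pvDA L r pc = pvDB L r pc := by
  unfold pvLists at hL
  simp only [List.mem_cons, List.not_mem_nil, or_false] at hL
  rcases hL with h | h | h | h | h | h | h | h <;> subst h <;>
    exact pvFinAll _ (by decide) r pc hr1 hr2 hp1 hp2

-- ===== VERDICT (by name: the statement is the Claim_ definition above) =====
theorem nearest_in_key_py_spec : Claim_equal_nearest_in_key_py := by
  intro m r mo _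
  unfold Spec_nearest_in_key_py
  rw [pvA_eq, pvB_eq]
  congr 1
  rw [pvDA_root, pvDB_root]
  have hpc : PySem.Int.mod m 12 = m % 12 := pvMod12 m
  rw [hpc]
  exact pvMain _ (pvIvs_mem mo) _ _ (Int.emod_nonneg _ (by norm_num))
    (Int.emod_lt_of_pos _ (by norm_num)) (Int.emod_nonneg _ (by norm_num))
    (Int.emod_lt_of_pos _ (by norm_num))
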